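-- pv_equiv track=rewrite | github.com/Wajktor13/ads-lab | asd/exams/2020-2021/d3/t2/zad2.py | double_prefix
-- ===== SOURCE A (Python) =====
-- class BinaryNode:
--     def __init__(self):
--         self.left = self.right = None
--         self.postfixes = 1
--
-- def double_prefix( L ):
--     L.sort(key=lambda string: len(string))
--     root = BinaryNode()
--     super_cools = []
--
--     for string in L:
--         node = root
--         for char in string:
--             if char == '0':
--                 if node.left is not None:
--                     node = node.left
--                     node.postfixes += 1
--                 else:
--                     node.left = BinaryNode()
--                     node = node.left
--
--             else:
--                 if node.right is not None:
--                     node = node.right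
--                     node.postfixes += 1
--                 else:
--                     node.right = BinaryNode()
--                     node = node.right
--     pass
--     find_super_cools(root.left, '0', super_cools)
--     find_super_cools(root.right, '1', super_cools)
--
--     return super_cools
--
-- def find_super_cools(node, string, super_cools):
--     if node is None or node.postfixes < 2 or (node.left is None and node.right is None):
--         return
--
--     if (node.right is None and node.left is not None and node.left.postfixes < 2) or\
--        (node.left is None and node.right is not None and node.right.postfixes < 2) or\
--        (node.left is not None and node.right is not None and node.left.postfixes < 2 and node.right.postfixes < 2):
--         super_cools.append(string)
--         return
--
--     find_super_cools(node.left, string +'0', super_cools)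
--     find_super_cools(node.right, string + '1', super_cools)
-- ===== SOURCE B (Python) =====
-- def double_prefix(L):
--     # Same in-place sort side effect as the original.
--     L.sort(key=lambda string: len(string))
--     tails = [list(s) for s in L]
--     return _go('0', [t[1:] for t in tails if t and t[0] == '0']) + \
--            _go('1', [t[1:] for t in tails if t and t[0] != '0'])
--
-- def _go(prefix, tails):
--     if len(tails) < 2:
--         return []
--     zeros = [t[1:] for t in tails if t and t[0] == '0']
--     ones = [t[1:] for t in tails if t and t[0] != '0']
--     if not zeros and not ones:
--         return []
--     if len(zeros) < 2 and len(ones) < 2: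
--         return [prefix]
--     return _go(prefix + '0', zeros) + _go(prefix + '1', ones)
-- ===== Notes on version B (the rewrite author's own statement) =====
-- stated objective: simpler
-- what changed: Replaces the mutable pointer-trie (BinaryNode class, per-node postfix counters, separate build and DFS phases) by one short pure recursion that partitions the list of remaining suffixes into the '0'-branch and the non-'0'-branch, so no tree is ever materialised; the in-place sort of L is kept for side-effect parity.
import Mathlib
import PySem

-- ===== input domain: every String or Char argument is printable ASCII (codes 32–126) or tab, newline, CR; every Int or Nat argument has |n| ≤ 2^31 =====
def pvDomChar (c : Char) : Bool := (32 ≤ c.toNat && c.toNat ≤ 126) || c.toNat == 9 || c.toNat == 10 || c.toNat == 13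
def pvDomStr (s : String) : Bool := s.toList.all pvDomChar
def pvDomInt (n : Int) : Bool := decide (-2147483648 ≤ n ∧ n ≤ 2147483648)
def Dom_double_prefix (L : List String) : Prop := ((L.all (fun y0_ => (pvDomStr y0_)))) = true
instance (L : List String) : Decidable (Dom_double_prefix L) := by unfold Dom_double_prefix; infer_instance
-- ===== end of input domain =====

-- B replaces A's mutable counter-trie by one pure recursion partitioning suffix lists (objective: simpler).
-- Both Pythons sort L in place by length (same side effect); the equivalence proved is about the return value.

-- ===== PORT A =====
-- the trie: `nil` is Python's None, `node l r p` a BinaryNode with postfixes p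
inductive PvBT where
  | nil : PvBT
  | node : PvBT → PvBT → Int → PvBT
deriving DecidableEq, Repr

-- the chain of fresh nodes created once the walk falls off the trie (the `else` arms of A's loop)
def pvFresh : List Char → PvBT
  | [] => PvBT.node PvBT.nil PvBT.nil 1
  | c :: cs => if c = '0' then PvBT.node (pvFresh cs) PvBT.nil 1 else PvBT.node PvBT.nil (pvFresh cs) 1

-- A's inner `for char in string` loop: walk/extend the trie from the current node, bumping postfixes
def pvIns : PvBT → List Char → PvBT
  | t, [] => t
  | PvBT.node l r p, c :: cs =>
      if c = '0' then
        match l with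
        | PvBT.node ll lr lp => PvBT.node (pvIns (PvBT.node ll lr (lp + 1)) cs) r p
        | PvBT.nil => PvBT.node (pvFresh cs) r p
      else
        match r with
        | PvBT.node rl rr rp => PvBT.node l (pvIns (PvBT.node rl rr (rp + 1)) cs) p
        | PvBT.nil => PvBT.node l (pvFresh cs) p
  | PvBT.nil, _ :: _ => PvBT.nil  -- unreachable: A never walks from None

-- node.postfixes (only read under a not-None guard, as in A)
def pvPfx : PvBT → Int
  | PvBT.nil => 0
  | PvBT.node _ _ p => p

-- find_super_cools, with the mutated super_cools list as an accumulator
def pvFsc : PvBT → String → List String → List String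
  | PvBT.nil, _, acc => acc
  | PvBT.node l r p, s, acc =>
      if p < 2 ∨ (l = PvBT.nil ∧ r = PvBT.nil) then acc
      else if (r = PvBT.nil ∧ l ≠ PvBT.nil ∧ pvPfx l < 2) ∨
              (l = PvBT.nil ∧ r ≠ PvBT.nil ∧ pvPfx r < 2) ∨
              (l ≠ PvBT.nil ∧ r ≠ PvBT.nil ∧ pvPfx l < 2 ∧ pvPfx r < 2) then acc ++ [s]
      else pvFsc r (s ++ "1") (pvFsc l (s ++ "0") acc)

def double_prefix (L : List String) : List String :=
  match (PySem.List.sorted L (fun s => PySem.Str.len s) false).foldl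
      (fun t s => pvIns t s.toList) (PvBT.node PvBT.nil PvBT.nil 1) with
  | PvBT.nil => []  -- unreachable: the root is a node
  | PvBT.node l r _ => pvFsc r "1" (pvFsc l "0" [])

-- ===== PORT B =====
-- [t[1:] for t in tails if t and t[0] == '0']
def pvZeros (ts : List (List Char)) : List (List Char) :=
  ts.filterMap (fun t => match t with
    | [] => Option.none
    | c :: r => if c = '0' then some r else Option.none)

-- [t[1:] for t in tails if t and t[0] != '0']
def pvOnes (ts : List (List Char)) : List (List Char) :=
  ts.filterMap (fun t => match t with
    | [] => Option.none
    | c :: r => if c ≠ '0' then some r else Option.none)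

-- termination measure for pvGo (and pvMk below)
def pvWeight (ts : List (List Char)) : Nat := (ts.map (fun t => t.length + 1)).sum

theorem pvWeight_filterMap_le (f : List Char → Option (List Char))
    (hf : ∀ t r, f t = some r → r.length < t.length) (ts : List (List Char)) :
    pvWeight (ts.filterMap f) ≤ pvWeight ts := by
  induction ts with
  | nil => simp [pvWeight]
  | cons t rest ih =>
    cases h : f t with
    | none => simp [pvWeight, List.filterMap_cons, h] at ih ⊢; omega
    | some r =>
      have := hf t r h
      simp [pvWeight, List.filterMap_cons, h] at ih ⊢
      omega

theorem pvWeight_filterMap_lt (f : List Char → Option (List Char))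
    (hf : ∀ t r, f t = some r → r.length < t.length) (ts : List (List Char)) (h : ts ≠ []) :
    pvWeight (ts.filterMap f) < pvWeight ts := by
  cases ts with
  | nil => exact absurd rfl h
  | cons t rest =>
    have hle := pvWeight_filterMap_le f hf rest
    cases hft : f t with
    | none => simp [pvWeight, List.filterMap_cons, hft] at hle ⊢; omega
    | some r =>
      have := hf t r hft
      simp [pvWeight, List.filterMap_cons, hft] at hle ⊢
      omega

theorem pvWeight_zeros_lt (ts : List (List Char)) (h : ts ≠ []) :
    pvWeight (pvZeros ts) < pvWeight ts := by
  refine pvWeight_filterMap_lt _ ?_ ts h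
  intro t r hfr
  cases t with
  | nil => simp at hfr
  | cons c cs =>
    simp only at hfr
    by_cases hc : c = '0' <;> simp [hc] at hfr <;> simp [← hfr]

theorem pvWeight_ones_lt (ts : List (List Char)) (h : ts ≠ []) :
    pvWeight (pvOnes ts) < pvWeight ts := by
  refine pvWeight_filterMap_lt _ ?_ ts h
  intro t r hfr
  cases t with
  | nil => simp at hfr
  | cons c cs =>
    simp only at hfr
    by_cases hc : c = '0' <;> simp [hc] at hfr <;> simp [← hfr]

def pvGo (pre : String) (tails : List (List Char)) : List String :=
  if tails.length < 2 then []
  else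
    let zeros := pvZeros tails
    let ones := pvOnes tails
    if zeros = [] ∧ ones = [] then []
    else if zeros.length < 2 ∧ ones.length < 2 then [pre]
    else pvGo (pre ++ "0") zeros ++ pvGo (pre ++ "1") ones
termination_by pvWeight tails
decreasing_by
  · exact pvWeight_zeros_lt tails (by intro h; subst h; simp at *)
  · exact pvWeight_ones_lt tails (by intro h; subst h; simp at *)

def double_prefix_alt (L : List String) : List String :=
  pvGo "0" (pvZeros ((PySem.List.sorted L (fun s => PySem.Str.len s) false).map String.toList)) ++
  pvGo "1" (pvOnes ((PySem.List.sorted L (fun s => PySem.Str.len s) false).map String.toList))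

-- ===== PRECONDITION & SPEC =====
def Spec_double_prefix (L : List String) (out : List String) : Prop := out = double_prefix_alt L
instance (L : List String) (out : List String) : Decidable (Spec_double_prefix L out) := by unfold Spec_double_prefix; infer_instance

-- ===== CLAIM (what is proved, stated in full; the proofs are below) =====
def Claim_equal_double_prefix : Prop := ∀ (L : List String), Dom_double_prefix L → Spec_double_prefix L (double_prefix L)

-- ===== LEMMAS AND PROOFS =====

-- abstraction: the trie a multiset of suffix lists denotes (postfixes = number of suffixes reaching the node)
def pvMk (ts : List (List Char)) : PvBT :=
  if h : ts = [] then PvBT.nil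
  else PvBT.node (pvMk (pvZeros ts)) (pvMk (pvOnes ts)) (ts.length : Int)
termination_by pvWeight ts
decreasing_by
  · exact pvWeight_zeros_lt ts h
  · exact pvWeight_ones_lt ts h

theorem pvMk_nil : pvMk [] = PvBT.nil := by simp [pvMk]

theorem pvMk_cons (ts : List (List Char)) (h : ts ≠ []) :
    pvMk ts = PvBT.node (pvMk (pvZeros ts)) (pvMk (pvOnes ts)) (ts.length : Int) := by
  rw [pvMk]; simp [h]

theorem pvMk_eq_nil_iff (ts : List (List Char)) : pvMk ts = PvBT.nil ↔ ts = [] := by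
  by_cases h : ts = []
  · simp [h, pvMk_nil]
  · rw [pvMk_cons ts h]; simp [h]

theorem pvPfx_mk (ts : List (List Char)) (h : ts ≠ []) : pvPfx (pvMk ts) = (ts.length : Int) := by
  rw [pvMk_cons ts h]; rfl

theorem pvZeros_append (a b : List (List Char)) : pvZeros (a ++ b) = pvZeros a ++ pvZeros b := by
  simp [pvZeros, List.filterMap_append]

theorem pvOnes_append (a b : List (List Char)) : pvOnes (a ++ b) = pvOnes a ++ pvOnes b := by
  simp [pvOnes, List.filterMap_append]

theorem pvFresh_mk (cs : List Char) : pvFresh cs = pvMk [cs] := by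
  induction cs with
  | nil =>
    rw [pvMk_cons [([] : List Char)] (by simp)]
    simp [pvFresh, pvZeros, pvOnes, pvMk_nil]
  | cons c rest ih =>
    by_cases hc : c = '0'
    · subst hc
      rw [pvMk_cons ['0' :: rest] (by simp)]
      simp [pvFresh, pvZeros, pvOnes, pvMk_nil, ih]
    · rw [pvMk_cons [c :: rest] (by simp)]
      simp [pvFresh, pvZeros, pvOnes, pvMk_nil, ih, hc]

theorem pvIns_mk (cs : List Char) : ∀ (ts0 ts1 : List (List Char)) (k : Int),
    pvIns (PvBT.node (pvMk ts0) (pvMk ts1) k) cs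
      = PvBT.node (pvMk (ts0 ++ pvZeros [cs])) (pvMk (ts1 ++ pvOnes [cs])) k := by
  induction cs with
  | nil =>
    intro ts0 ts1 k
    simp [pvIns, pvZeros, pvOnes]
  | cons c rest ih =>
    intro ts0 ts1 k
    by_cases hc : c = '0'
    · subst hc
      have hz : pvZeros [('0' :: rest)] = [rest] := by simp [pvZeros]
      have ho : pvOnes [('0' :: rest)] = [] := by simp [pvOnes]
      rw [hz, ho, List.append_nil]
      by_cases h0 : ts0 = []
      · subst h0
        rw [pvMk_nil]
        simp only [pvIns, if_pos rfl]
        rw [pvFresh_mk]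
        rfl
      · rw [pvMk_cons ts0 h0]
        simp only [pvIns, if_pos rfl]
        have hstep := ih (pvZeros ts0) (pvOnes ts0) ((ts0.length : Int) + 1)
        rw [hstep]
        rw [pvMk_cons (ts0 ++ [rest]) (by simp)]
        rw [pvZeros_append, pvOnes_append]
        simp [pvZeros, pvOnes]
    · have hz : pvZeros [(c :: rest)] = [] := by simp [pvZeros, hc]
      have ho : pvOnes [(c :: rest)] = [rest] := by simp [pvOnes, hc]
      rw [hz, ho, List.append_nil]
      by_cases h1 : ts1 = []
      · subst h1
        rw [pvMk_nil]
        simp only [pvIns, if_neg hc]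
        rw [pvFresh_mk]
        rfl
      · rw [pvMk_cons ts1 h1]
        simp only [pvIns, if_neg hc]
        have hstep := ih (pvZeros ts1) (pvOnes ts1) ((ts1.length : Int) + 1)
        rw [hstep]
        rw [pvMk_cons (ts1 ++ [rest]) (by simp)]
        rw [pvZeros_append, pvOnes_append]
        simp [pvZeros, pvOnes]

theorem pvFold_mk (css : List (List Char)) : ∀ (ts0 ts1 : List (List Char)) (k : Int),
    css.foldl pvIns (PvBT.node (pvMk ts0) (pvMk ts1) k)
      = PvBT.node (pvMk (ts0 ++ pvZeros css)) (pvMk (ts1 ++ pvOnes css)) k := by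
  induction css with
  | nil => intro ts0 ts1 k; simp [pvZeros, pvOnes]
  | cons cs rest ih =>
    intro ts0 ts1 k
    simp only [List.foldl_cons]
    rw [pvIns_mk cs ts0 ts1 k, ih]
    have : pvZeros (cs :: rest) = pvZeros [cs] ++ pvZeros rest := by
      simpa using pvZeros_append [cs] rest
    have h1 : pvOnes (cs :: rest) = pvOnes [cs] ++ pvOnes rest := by
      simpa using pvOnes_append [cs] rest
    rw [this, h1, List.append_assoc, List.append_assoc]

theorem pvFsc_mk (n : Nat) : ∀ (ts : List (List Char)) (pre : String) (acc : List String),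
    pvWeight ts < n → pvFsc (pvMk ts) pre acc = acc ++ pvGo pre ts := by
  induction n with
  | zero => intro ts pre acc h; omega
  | succ n ih =>
    intro ts pre acc hw
    by_cases h0 : ts = []
    · subst h0
      rw [pvMk_nil, pvGo]
      simp [pvFsc]
    · rw [pvMk_cons ts h0, pvGo]
      have hlen : 1 ≤ ts.length := by
        cases ts with | nil => exact absurd rfl h0 | cons a b => simp
      by_cases hsmall : ts.length < 2
      · rw [if_pos hsmall]
        simp only [pvFsc]
        rw [if_pos (by left; exact_mod_cast hsmall)]
        simp
      · rw [if_neg hsmall]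
        simp only [pvFsc]
        have hp2 : ¬ ((ts.length : Int) < 2) := by exact_mod_cast hsmall
        by_cases hleaf : pvZeros ts = [] ∧ pvOnes ts = []
        · rw [if_pos (by
            right
            exact ⟨(pvMk_eq_nil_iff _).mpr hleaf.1, (pvMk_eq_nil_iff _).mpr hleaf.2⟩)]
          rw [if_pos hleaf]
          simp
        · rw [if_neg (by
            rintro (h | ⟨hz, hoc⟩)
            · exact hp2 h
            · exact hleaf ⟨(pvMk_eq_nil_iff _).mp hz, (pvMk_eq_nil_iff _).mp hoc⟩)]
          rw [if_neg hleaf]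
          -- the three-way append condition of A equals B's "both branch counts < 2"
          have hcond : ((pvMk (pvOnes ts) = PvBT.nil ∧ pvMk (pvZeros ts) ≠ PvBT.nil ∧ pvPfx (pvMk (pvZeros ts)) < 2) ∨
              (pvMk (pvZeros ts) = PvBT.nil ∧ pvMk (pvOnes ts) ≠ PvBT.nil ∧ pvPfx (pvMk (pvOnes ts)) < 2) ∨
              (pvMk (pvZeros ts) ≠ PvBT.nil ∧ pvMk (pvOnes ts) ≠ PvBT.nil ∧
                pvPfx (pvMk (pvZeros ts)) < 2 ∧ pvPfx (pvMk (pvOnes ts)) < 2))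
              ↔ ((pvZeros ts).length < 2 ∧ (pvOnes ts).length < 2) := by
            by_cases hz : pvZeros ts = [] <;> by_cases ho : pvOnes ts = []
            · exact absurd ⟨hz, ho⟩ hleaf
            · have hlo : 1 ≤ (pvOnes ts).length := by
                cases hoo : pvOnes ts with
                | nil => exact absurd hoo ho
                | cons a b => simp
              constructor
              · rintro (⟨_, hne, _⟩ | ⟨_, _, hp⟩ | ⟨hne, _, _⟩)
                · exact absurd ((pvMk_eq_nil_iff _).mpr hz) hne
                · rw [pvPfx_mk _ ho] at hp
                  exact ⟨by simp [hz], by exact_mod_cast hp⟩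
                · exact absurd ((pvMk_eq_nil_iff _).mpr hz) hne
              · rintro ⟨_, h2⟩
                right; left
                refine ⟨(pvMk_eq_nil_iff _).mpr hz, by simp [pvMk_eq_nil_iff, ho], ?_⟩
                rw [pvPfx_mk _ ho]; exact_mod_cast h2
            · have hlz : 1 ≤ (pvZeros ts).length := by
                cases hzz : pvZeros ts with
                | nil => exact absurd hzz hz
                | cons a b => simp
              constructor
              · rintro (⟨_, _, hp⟩ | ⟨hne, _, _⟩ | ⟨_, hne, _⟩)
                · rw [pvPfx_mk _ hz] at hp
                  exact ⟨by exact_mod_cast hp, by simp [ho]⟩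
                · exact absurd ((pvMk_eq_nil_iff _).mp hne) hz
                · exact absurd ((pvMk_eq_nil_iff _).mpr ho) hne
              · rintro ⟨h1, _⟩
                left
                refine ⟨(pvMk_eq_nil_iff _).mpr ho, by simp [pvMk_eq_nil_iff, hz], ?_⟩
                rw [pvPfx_mk _ hz]; exact_mod_cast h1
            · have hnez : pvMk (pvZeros ts) ≠ PvBT.nil := by simp [pvMk_eq_nil_iff, hz]
              have hneo : pvMk (pvOnes ts) ≠ PvBT.nil := by simp [pvMk_eq_nil_iff, ho]
              constructor
              · rintro (⟨h, _⟩ | ⟨h, _⟩ | ⟨_, _, h1, h2⟩)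
                · exact absurd ((pvMk_eq_nil_iff _).mp h) ho
                · exact absurd ((pvMk_eq_nil_iff _).mp h) hz
                · rw [pvPfx_mk _ hz] at h1; rw [pvPfx_mk _ ho] at h2
                  exact ⟨by exact_mod_cast h1, by exact_mod_cast h2⟩
              · rintro ⟨h1, h2⟩
                right; right
                refine ⟨hnez, hneo, ?_, ?_⟩
                · rw [pvPfx_mk _ hz]; exact_mod_cast h1
                · rw [pvPfx_mk _ ho]; exact_mod_cast h2
          by_cases hsc : (pvZeros ts).length < 2 ∧ (pvOnes ts).length < 2
          · rw [if_pos (hcond.mpr hsc), if_pos hsc]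
          · rw [if_neg (fun hh => hsc (hcond.mp hh)), if_neg hsc]
            have hwz : pvWeight (pvZeros ts) < n :=
              lt_of_lt_of_le (pvWeight_zeros_lt ts h0) (by omega)
            have hwo : pvWeight (pvOnes ts) < n :=
              lt_of_lt_of_le (pvWeight_ones_lt ts h0) (by omega)
            rw [ih (pvZeros ts) (pre ++ "0") acc hwz,
                ih (pvOnes ts) (pre ++ "1") (acc ++ pvGo (pre ++ "0") (pvZeros ts)) hwo,
                List.append_assoc]

-- ===== VERDICT (by name: the statement is the Claim_ definition above) =====
theorem double_prefix_spec : Claim_equal_double_prefix := by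
  intro L _
  unfold Spec_double_prefix double_prefix double_prefix_alt
  set L' := PySem.List.sorted L (fun s => PySem.Str.len s) false with hL'
  have hfold : L'.foldl (fun t s => pvIns t s.toList) (PvBT.node PvBT.nil PvBT.nil 1)
      = (L'.map String.toList).foldl pvIns (PvBT.node PvBT.nil PvBT.nil 1) := by
    rw [List.foldl_map]
  rw [hfold]
  have hroot : (L'.map String.toList).foldl pvIns (PvBT.node PvBT.nil PvBT.nil 1)
      = PvBT.node (pvMk (pvZeros (L'.map String.toList))) (pvMk (pvOnes (L'.map String.toList))) 1 := by
    have := pvFold_mk (L'.map String.toList) [] [] 1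
    simpa [pvMk_nil] using this
  rw [hroot]
  simp only []
  set ts := L'.map String.toList
  rw [pvFsc_mk (pvWeight (pvZeros ts) + 1) (pvZeros ts) "0" [] (by omega),
      pvFsc_mk (pvWeight (pvOnes ts) + 1) (pvOnes ts) "1" ([] ++ pvGo "0" (pvZeros ts)) (by omega)]
  simp
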